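-- pv_equiv track=rewrite | github.com/BBNoodle/code_analysis | code_analysis/__init__.py | _calculate_list_diff
-- ===== SOURCE A (Python) =====
-- def _calculate_list_diff(target: list, be_subtracted: list):
--     for item in be_subtracted:
--         try:
--             index = target.index(item)
--             del target[index]
--         except:
--             target.append(item)
--     return target
-- ===== SOURCE B (Python) =====
-- def _calculate_list_diff(target: list, be_subtracted: list):
--     # Lazy-deletion rewrite: one index pass over target builds, per value, a
--     # stack of its live positions (leftmost on top); each subtracted item then
--     # deletes its leftmost live copy in O(1), or is appended if none is left.
--     # Mutates `target` in place (slice assignment) and returns it, O(n+m).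
--     seq = list(target)
--     alive = [True] * len(seq)
--     free = {}
--     for i in range(len(seq) - 1, -1, -1):
--         free.setdefault(seq[i], []).append(i)
--     for v in be_subtracted:
--         stack = free.get(v)
--         if stack:
--             alive[stack.pop()] = False
--         else:
--             free[v] = [len(seq)]
--             seq.append(v)
--             alive.append(True)
--     target[:] = [v for v, a in zip(seq, alive) if a]
--     return target
-- ===== Notes on version B (the rewrite author's own statement) =====
-- stated objective: faster
-- what changed: A rescans target with list.index/del for every subtracted item (O(n*m)); B builds one dict of per-value stacks of live positions so each item deletes its leftmost live copy in O(1) via lazy deletion (alive flags), or appends, then emits the survivors in one pass.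
import Mathlib
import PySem

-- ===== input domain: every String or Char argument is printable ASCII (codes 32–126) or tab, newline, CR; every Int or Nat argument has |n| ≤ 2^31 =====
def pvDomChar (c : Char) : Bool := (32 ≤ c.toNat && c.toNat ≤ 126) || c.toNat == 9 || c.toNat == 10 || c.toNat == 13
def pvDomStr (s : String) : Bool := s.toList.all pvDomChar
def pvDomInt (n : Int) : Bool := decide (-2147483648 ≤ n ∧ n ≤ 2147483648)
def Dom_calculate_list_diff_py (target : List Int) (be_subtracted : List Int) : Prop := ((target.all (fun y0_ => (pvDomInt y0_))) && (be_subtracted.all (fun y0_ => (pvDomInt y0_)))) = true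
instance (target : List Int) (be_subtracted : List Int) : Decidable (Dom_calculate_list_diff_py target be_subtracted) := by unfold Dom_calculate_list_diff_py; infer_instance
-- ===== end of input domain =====

-- B replaces A's per-item list scans (O(n*m)) by one dict of per-value position stacks
-- with lazy deletion (O(n+m)); like A, Python B mutates `target` in place to the
-- returned value, and the equivalence proved here is about the return value.


-- ===== PORT A =====
-- for item in be_subtracted: try: del target[target.index(item)] except: target.append(item)
def calculate_list_diff_py (target : List Int) (be_subtracted : List Int) : List Int :=
  be_subtracted.foldl (fun t item =>
    match PySem.List.index? t item with
    | some i => t.eraseIdx i        -- del target[index]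
    | none => t ++ [item]) target   -- .index raised ValueError -> target.append(item)

-- ===== PORT B =====
-- for i in range(len(seq)-1, -1, -1): free.setdefault(seq[i], []).append(i)
-- (the reversed in-range index loop is ported as a foldl over (List.range n).reverse;
--  i < len seq, so seq[i] is exactly seq.getD i 0)
def pvBuildFree (seq : List Int) : PySem.Dict Int (List Nat) :=
  (List.range seq.length).reverse.foldl
    (fun f i => f.insert (seq.getD i 0) (f.getD (seq.getD i 0) [] ++ [i]))
    PySem.Dict.empty

-- loop body: stack = free.get(v); if stack: alive[stack.pop()] = False
--            else: free[v] = [len(seq)]; seq.append(v); alive.append(True)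
-- (list.pop() = last element; the popped index is in range, so List.set is exact)
def pvStepB (s : List Int × List Bool × PySem.Dict Int (List Nat)) (v : Int) :
    List Int × List Bool × PySem.Dict Int (List Nat) :=
  match (s.2.2.getD v []).getLast? with
  | some i => (s.1, s.2.1.set i false, s.2.2.insert v (s.2.2.getD v []).dropLast)
  | none => (s.1 ++ [v], s.2.1 ++ [true], s.2.2.insert v [s.1.length])

def calculate_list_diff_py_alt (target : List Int) (be_subtracted : List Int) : List Int :=
  let st := be_subtracted.foldl pvStepB
    (target, List.replicate target.length true, pvBuildFree target)
  -- target[:] = [v for v, a in zip(seq, alive) if a]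
  (st.1.zip st.2.1).filterMap (fun p => if p.2 then some p.1 else none)

-- ===== PRECONDITION & SPEC =====
def Spec_calculate_list_diff_py (target : List Int) (be_subtracted : List Int) (out : List Int) : Prop := out = calculate_list_diff_py_alt target be_subtracted
instance (target : List Int) (be_subtracted : List Int) (out : List Int) : Decidable (Spec_calculate_list_diff_py target be_subtracted out) := by unfold Spec_calculate_list_diff_py; infer_instance

-- ===== CLAIM (what is proved, stated in full; the proofs are below) =====
def Claim_equal_calculate_list_diff_py : Prop := ∀ (target : List Int) (be_subtracted : List Int), Dom_calculate_list_diff_py target be_subtracted → Spec_calculate_list_diff_py target be_subtracted (calculate_list_diff_py target be_subtracted)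

-- ===== LEMMAS AND PROOFS =====

-- the survivors: elements of seq whose alive flag is still set
def fa : List Int → List Bool → List Int
  | x :: s, a :: al => if a then x :: fa s al else fa s al
  | _, _ => []

-- increasing list of live positions holding value v
def liveIdx : List Int → List Bool → Int → List Nat
  | x :: s, a :: al, v =>
      if a ∧ x = v then 0 :: (liveIdx s al v).map (· + 1)
      else (liveIdx s al v).map (· + 1)
  | _, _, _ => []

theorem fa_zip (seq : List Int) : ∀ alive : List Bool,
    (seq.zip alive).filterMap (fun p => if p.2 then some p.1 else none) = fa seq alive := by
  induction seq with
  | nil => intro alive; cases alive <;> simp [fa]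
  | cons x s ih =>
    intro alive
    cases alive with
    | nil => simp [fa]
    | cons a al =>
      cases a <;> simp [fa, List.zip_cons_cons, ih]

theorem fa_replicate (seq : List Int) : fa seq (List.replicate seq.length true) = seq := by
  induction seq with
  | nil => rfl
  | cons x s ih => simp [List.replicate_succ, fa, ih]

theorem liveIdx_nil_iff (seq : List Int) : ∀ alive v,
    liveIdx seq alive v = [] ↔ v ∉ fa seq alive := by
  induction seq with
  | nil => intro alive v; cases alive <;> simp [fa, liveIdx]
  | cons x s ih =>
    intro alive v
    cases alive with
    | nil => simp [fa, liveIdx]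
    | cons a al =>
      by_cases h : (a = true) ∧ x = v
      · simp [liveIdx, fa, h.1, h.2]
      · rw [liveIdx, if_neg (by tauto)]
        cases a with
        | false => simp [fa, ih]
        | true =>
          have hxv : ¬ x = v := by tauto
          simp [fa, ih]
          exact fun _ h' => hxv h'.symm

theorem liveIdx_cons_extract {l : List Nat} {i : Nat} {rest : List Nat}
    (h : l.map (· + 1) = i :: rest) :
    ∃ j rest', l = j :: rest' ∧ i = j + 1 ∧ rest = rest'.map (· + 1) := by
  cases l with
  | nil => simp at h
  | cons j rest' =>
    simp only [List.map_cons, List.cons.injEq] at h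
    exact ⟨j, rest', rfl, h.1.symm, h.2.symm⟩

theorem fa_set (seq : List Int) : ∀ (alive : List Bool) (v : Int) (i : Nat) (rest : List Nat),
    liveIdx seq alive v = i :: rest → fa seq (alive.set i false) = (fa seq alive).erase v := by
  induction seq with
  | nil => intro alive v i rest h; cases alive <;> simp [liveIdx] at h
  | cons x s ih =>
    intro alive v i rest h
    cases alive with
    | nil => simp [liveIdx] at h
    | cons a al =>
      by_cases hc : (a = true) ∧ x = v
      · rw [liveIdx, if_pos hc] at h
        obtain ⟨rfl, -⟩ : 0 = i ∧ (liveIdx s al v).map (· + 1) = rest := by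
          simpa using h
        simp [List.set_cons_zero, fa, hc.1, hc.2]
      · rw [liveIdx, if_neg (by tauto)] at h
        obtain ⟨j, rest', hl, rfl, -⟩ := liveIdx_cons_extract h
        rw [List.set_cons_succ]
        cases a with
        | false => simp [fa, ih al v j rest' hl]
        | true =>
          have hxv : ¬ x = v := by tauto
          simp [fa, ih al v j rest' hl,
            List.erase_cons_tail (by simp [hxv] : ¬ (x == v) = true)]

theorem liveIdx_set (seq : List Int) :
    ∀ (alive : List Bool) (v : Int) (i : Nat) (rest : List Nat) (w : Int),
    liveIdx seq alive v = i :: rest →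
    liveIdx seq (alive.set i false) w = if w = v then rest else liveIdx seq alive w := by
  induction seq with
  | nil => intro alive v i rest w h; cases alive <;> simp [liveIdx] at h
  | cons x s ih =>
    intro alive v i rest w h
    cases alive with
    | nil => simp [liveIdx] at h
    | cons a al =>
      by_cases hc : (a = true) ∧ x = v
      · rw [liveIdx, if_pos hc] at h
        obtain ⟨rfl, rfl⟩ : 0 = i ∧ (liveIdx s al v).map (· + 1) = rest := by
          simpa using h
        rw [List.set_cons_zero]
        by_cases hw : w = v
        · subst hw
          rw [liveIdx, if_neg (by simp), if_pos rfl]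
        · rw [liveIdx, if_neg (by simp), if_neg hw, liveIdx,
            if_neg (by rintro ⟨-, hx⟩; exact hw (hx ▸ hc.2))]
      · rw [liveIdx, if_neg (by tauto)] at h
        obtain ⟨j, rest', hl, rfl, rfl⟩ := liveIdx_cons_extract h
        rw [List.set_cons_succ]
        have ihw := ih al v j rest' w hl
        by_cases hw : w = v
        · rw [if_pos hw] at ihw
          have : ¬ ((a = true) ∧ x = w) := by rw [hw]; tauto
          rw [liveIdx, if_neg this, ihw, if_pos hw]
        · rw [if_neg hw] at ihw
          rw [liveIdx, liveIdx, ihw, if_neg hw]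

theorem fa_append (seq : List Int) : ∀ (alive : List Bool) (v : Int),
    alive.length = seq.length →
    fa (seq ++ [v]) (alive ++ [true]) = fa seq alive ++ [v] := by
  induction seq with
  | nil =>
    intro alive v h
    cases alive with
    | nil => simp [fa]
    | cons a al => simp at h
  | cons x s ih =>
    intro alive v h
    cases alive with
    | nil => simp at h
    | cons a al =>
      cases a <;> simp [fa, ih al v (by simpa using h)]

theorem liveIdx_append (seq : List Int) : ∀ (alive : List Bool) (v w : Int),
    alive.length = seq.length →
    liveIdx (seq ++ [v]) (alive ++ [true]) w
      = liveIdx seq alive w ++ (if v = w then [seq.length] else []) := by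
  induction seq with
  | nil =>
    intro alive v w h
    cases alive with
    | nil =>
      by_cases hvw : v = w
      · simp [liveIdx, hvw]
      · simp [liveIdx, fun h' : v = w => hvw h']
    | cons a al => simp at h
  | cons x s ih =>
    intro alive v w h
    cases alive with
    | nil => simp at h
    | cons a al =>
      have ihw := ih al v w (by simpa using h)
      simp only [List.cons_append, liveIdx, ihw, List.map_append]
      split
      · simp only [List.length_cons]
        split <;> simp
      · simp only [List.length_cons]
        split <;> simp

-- build-phase fold: each index i is appended to the stack of key seq[i]
theorem buildFold (seq : List Int) (L : List Nat) :
    ∀ (f : PySem.Dict Int (List Nat)) (v : Int),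
    ((L.foldl (fun f i => f.insert (seq.getD i 0) (f.getD (seq.getD i 0) [] ++ [i])) f).getD v [])
      = f.getD v [] ++ L.filter (fun i => decide (seq.getD i 0 = v)) := by
  induction L with
  | nil => intro f v; simp
  | cons i L ih =>
    intro f v
    rw [List.foldl_cons, ih, PySem.Dict.getD_insert, List.filter_cons]
    by_cases hv : v = seq.getD i 0
    · subst hv
      simp
    · rw [if_neg hv, if_neg (by simpa using fun h : seq.getD i 0 = v => hv h.symm)]

theorem liveIdx_range (seq : List Int) (v : Int) :
    liveIdx seq (List.replicate seq.length true) v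
      = (List.range seq.length).filter (fun i => decide (seq.getD i 0 = v)) := by
  induction seq with
  | nil => rfl
  | cons x s ih =>
    rw [List.length_cons, List.range_succ_eq_map, List.replicate_succ]
    rw [List.filter_cons]
    rw [List.filter_map]
    have hcomp : ((fun i => decide ((x :: s).getD i 0 = v)) ∘ (· + 1))
        = fun i => decide (s.getD i 0 = v) := by
      funext i; simp [Function.comp]
    rw [hcomp, ← ih]
    by_cases hx : x = v
    · rw [liveIdx, if_pos ⟨rfl, hx⟩, if_pos (by simpa using hx)]
    · rw [liveIdx, if_neg (by tauto), if_neg (by simpa using hx)]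

theorem pvBuildFree_getD (seq : List Int) (v : Int) :
    (pvBuildFree seq).getD v [] = (liveIdx seq (List.replicate seq.length true) v).reverse := by
  unfold pvBuildFree
  rw [buildFold, liveIdx_range, ← List.filter_reverse]
  simp [PySem.Dict.getD, PySem.Dict.empty, PySem.Dict.get?]

-- the match in A's loop body
theorem stepA_mem (t : List Int) (v : Int) (h : v ∈ t) :
    (match PySem.List.index? t v with
     | some i => t.eraseIdx i
     | none => t ++ [v]) = t.erase v := by
  induction t with
  | nil => simp at h
  | cons x t ih =>
    by_cases hx : x = v
    · subst hx; rw [PySem.List.index?_cons_self]; simp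
    · rw [PySem.List.index?_cons_of_ne t hx]
      have h' : v ∈ t := by
        rcases List.mem_cons.mp h with h' | h'
        · exact absurd h'.symm hx
        · exact h'
      cases hi : PySem.List.index? t v with
      | none => rw [PySem.List.index?_eq_none_iff] at hi; exact absurd h' hi
      | some i =>
        have hih := ih h'
        rw [hi] at hih
        simp only [Option.map_some, List.eraseIdx_cons_succ,
          List.erase_cons_tail (by simp [hx] : ¬ (x == v) = true)]
        simpa using hih

theorem stepA_not_mem (t : List Int) (v : Int) (h : v ∉ t) :
    (match PySem.List.index? t v with
     | some i => t.eraseIdx i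
     | none => t ++ [v]) = t ++ [v] := by
  rw [(PySem.List.index?_eq_none_iff t v).mpr h]

-- the loop invariant tying B's state to A's current list fa seq alive
def BInv (seq : List Int) (alive : List Bool) (free : PySem.Dict Int (List Nat)) : Prop :=
  alive.length = seq.length ∧ ∀ v, free.getD v [] = (liveIdx seq alive v).reverse

theorem step_ok (seq : List Int) (alive : List Bool) (free : PySem.Dict Int (List Nat))
    (v : Int) (h : BInv seq alive free) :
    BInv (pvStepB (seq, alive, free) v).1 (pvStepB (seq, alive, free) v).2.1
        (pvStepB (seq, alive, free) v).2.2 ∧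
    (match PySem.List.index? (fa seq alive) v with
     | some i => (fa seq alive).eraseIdx i
     | none => fa seq alive ++ [v])
      = fa (pvStepB (seq, alive, free) v).1 (pvStepB (seq, alive, free) v).2.1 := by
  obtain ⟨hlen, hfree⟩ := h
  cases hL : (free.getD v []).getLast? with
  | some i =>
    have hrev : (liveIdx seq alive v).reverse.getLast? = some i := by rw [← hfree]; exact hL
    rw [List.getLast?_reverse] at hrev
    obtain ⟨rest, hli⟩ : ∃ rest, liveIdx seq alive v = i :: rest := by
      cases hli : liveIdx seq alive v with
      | nil => rw [hli] at hrev; simp at hrev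
      | cons a b => rw [hli] at hrev; simp at hrev; exact ⟨b, by rw [hrev]⟩
    have hmem : v ∈ fa seq alive := by
      by_contra hv
      have := (liveIdx_nil_iff seq alive v).mpr hv
      rw [this] at hli; simp at hli
    have hstep : pvStepB (seq, alive, free) v
        = (seq, alive.set i false, free.insert v (free.getD v []).dropLast) := by
      simp [pvStepB, hL]
    refine ⟨⟨?_, ?_⟩, ?_⟩
    · rw [hstep]; simpa using hlen
    · intro w
      rw [hstep]
      simp only
      rw [PySem.Dict.getD_insert, liveIdx_set seq alive v i rest w hli]
      by_cases hw : w = v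
      · rw [if_pos hw, if_pos hw, hfree, hli]
        simp
      · rw [if_neg hw, if_neg hw, hfree]
    · rw [hstep]
      simp only
      rw [stepA_mem _ _ hmem, fa_set seq alive v i rest hli]
  | none =>
    have h0 : free.getD v [] = [] := List.getLast?_eq_none_iff.mp hL
    have hli : liveIdx seq alive v = [] := by
      have := hfree v
      rw [h0] at this
      simpa using this.symm
    have hmem : v ∉ fa seq alive := (liveIdx_nil_iff seq alive v).mp hli
    have hstep : pvStepB (seq, alive, free) v
        = (seq ++ [v], alive ++ [true], free.insert v [seq.length]) := by
      simp [pvStepB, hL]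
    refine ⟨⟨?_, ?_⟩, ?_⟩
    · rw [hstep]; simp [hlen]
    · intro w
      rw [hstep]
      simp only
      rw [PySem.Dict.getD_insert, liveIdx_append seq alive v w hlen]
      by_cases hw : w = v
      · subst hw
        rw [hli]
        simp
      · rw [if_neg hw, if_neg (fun h' : v = w => hw h'.symm), hfree]
        simp
    · rw [hstep]
      simp only
      rw [stepA_not_mem _ _ hmem, fa_append seq alive v hlen]

theorem fold_ok (bs : List Int) : ∀ (seq : List Int) (alive : List Bool)
    (free : PySem.Dict Int (List Nat)), BInv seq alive free →
    calculate_list_diff_py (fa seq alive) bs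
      = fa (bs.foldl pvStepB (seq, alive, free)).1 (bs.foldl pvStepB (seq, alive, free)).2.1 := by
  induction bs with
  | nil => intro seq alive free _; simp [calculate_list_diff_py]
  | cons v bs ih =>
    intro seq alive free h
    obtain ⟨hinv, hstep⟩ := step_ok seq alive free v h
    have h1 : calculate_list_diff_py (fa seq alive) (v :: bs)
        = calculate_list_diff_py
            (fa (pvStepB (seq, alive, free) v).1 (pvStepB (seq, alive, free) v).2.1) bs := by
      simp only [calculate_list_diff_py, List.foldl_cons]
      rw [← hstep]
    rw [h1, List.foldl_cons]
    exact ih _ _ _ hinv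

-- ===== VERDICT (by name: the statement is the Claim_ definition above) =====
theorem calculate_list_diff_py_spec : Claim_equal_calculate_list_diff_py := by
  intro target bs _
  unfold Spec_calculate_list_diff_py calculate_list_diff_py_alt
  simp only
  rw [fa_zip]
  rw [← fold_ok bs target (List.replicate target.length true) (pvBuildFree target)
    ⟨by simp, fun v => pvBuildFree_getD target v⟩]
  rw [fa_replicate]
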